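-- pv_equiv track=rewrite | github.com/DarioDaF/aoc2022 | 15.py | findHole
-- ===== SOURCE A (Python) =====
-- def findHole(segs: list[tuple[int, int]], searchSpace: tuple[int, int]):
--     start = searchSpace[0]
--     for seg in sorted(segs, key=lambda seg: seg[0]):
--         if seg[0] > start:
--             return start
--         real_start = max(start, seg[0])
--         s = seg[1] - real_start + 1
--         if s > 0: # If not completely eaten
--             start = seg[1] + 1
--             if start > searchSpace[1]:
--                 return None
--     #if start <= searchSpace[1]: # Always true if searchSpace is not empty
--     return start
-- ===== SOURCE B (Python) =====
-- def findHole(segs, searchSpace):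
--     # Merge the (sorted, non-empty) segments into disjoint, non-adjacent
--     # intervals first, then walk the merged intervals once.
--     ordered = [s for s in sorted(segs, key=lambda seg: seg[0]) if s[1] >= s[0]]
--     merged = []
--     i = 0
--     n = len(ordered)
--     while i < n:
--         a, b = ordered[i]
--         i += 1
--         while i < n and ordered[i][0] <= b + 1:
--             b = max(b, ordered[i][1])
--             i += 1
--         merged.append((a, b))
--     pos = searchSpace[0]
--     for a, b in merged:
--         if a > pos:
--             return pos
--         if b >= pos:
--             pos = b + 1
--             if pos > searchSpace[1]:
--                 return None
--     return pos
-- ===== Notes on version B (the rewrite author's own statement) =====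
-- stated objective: alternative
-- what changed: B first coalesces the sorted segments into disjoint non-adjacent merged intervals (dropping empty segments) and then walks the merged intervals in a separate pass, instead of A's single sweep that re-examines every raw segment against the moving frontier.
import Mathlib
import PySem

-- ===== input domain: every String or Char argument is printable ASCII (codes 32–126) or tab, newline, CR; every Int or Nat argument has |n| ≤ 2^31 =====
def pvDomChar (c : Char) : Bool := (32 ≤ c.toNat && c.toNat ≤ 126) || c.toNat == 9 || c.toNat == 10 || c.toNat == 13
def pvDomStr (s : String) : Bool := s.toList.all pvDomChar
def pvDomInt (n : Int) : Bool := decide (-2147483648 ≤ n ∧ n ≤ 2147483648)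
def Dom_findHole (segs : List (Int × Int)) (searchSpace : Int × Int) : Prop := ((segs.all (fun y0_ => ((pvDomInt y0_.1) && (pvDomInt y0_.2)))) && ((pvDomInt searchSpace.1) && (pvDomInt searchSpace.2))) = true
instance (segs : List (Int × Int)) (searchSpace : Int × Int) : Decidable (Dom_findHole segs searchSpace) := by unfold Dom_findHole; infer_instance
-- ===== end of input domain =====

-- B merges the sorted segments into disjoint non-adjacent intervals first, then walks
-- them in a second pass; proved to return exactly A's value on every input (alternative decomposition).

-- ===== PORT A =====
-- A's for-loop over the sorted segments, with its early returns, as structural recursion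
def findHoleLoop (hi : Int) : List (Int × Int) → Int → Option Int
  | [], start => some start
  | seg :: rest, start =>
    if seg.1 > start then some start
    else
      let real_start := max start seg.1
      let s := seg.2 - real_start + 1
      if s > 0 then
        let start' := seg.2 + 1
        if start' > hi then none else findHoleLoop hi rest start'
      else findHoleLoop hi rest start

def findHole (segs : List (Int × Int)) (searchSpace : Int × Int) : Option Int :=
  findHoleLoop searchSpace.2 (PySem.List.sorted segs (fun seg => seg.1) false) searchSpace.1

-- ===== PORT B =====
-- B's inner while-loop: coalesce following segments into the current interval (a, b)
def mergeFrom (a b : Int) : List (Int × Int) → List (Int × Int)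
  | [] => [(a, b)]
  | (c, d) :: r => if c ≤ b + 1 then mergeFrom a (max b d) r else (a, b) :: mergeFrom c d r

-- B's outer while-loop over the ordered segments
def mergeB : List (Int × Int) → List (Int × Int)
  | [] => []
  | (a, b) :: r => mergeFrom a b r

-- B's final for-loop over the merged intervals
def walkB (hi : Int) : List (Int × Int) → Int → Option Int
  | [], pos => some pos
  | (a, b) :: r, pos =>
    if a > pos then some pos
    else if b ≥ pos then (if b + 1 > hi then none else walkB hi r (b + 1))
    else walkB hi r pos

def findHole_alt (segs : List (Int × Int)) (searchSpace : Int × Int) : Option Int :=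
  let ordered := (PySem.List.sorted segs (fun seg => seg.1) false).filter (fun s => s.2 ≥ s.1)
  walkB searchSpace.2 (mergeB ordered) searchSpace.1

-- ===== PRECONDITION & SPEC =====
def Spec_findHole (segs : List (Int × Int)) (searchSpace : Int × Int) (out : Option Int) : Prop := out = findHole_alt segs searchSpace
instance (segs : List (Int × Int)) (searchSpace : Int × Int) (out : Option Int) : Decidable (Spec_findHole segs searchSpace out) := by unfold Spec_findHole; infer_instance

-- ===== CLAIM (what is proved, stated in full; the proofs are below) =====
def Claim_equal_findHole : Prop := ∀ (segs : List (Int × Int)) (searchSpace : Int × Int), Dom_findHole segs searchSpace → Spec_findHole segs searchSpace (findHole segs searchSpace)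

-- ===== LEMMAS AND PROOFS =====

-- A's sweep behaves exactly like B's walk (on any list)
theorem findHoleLoop_eq_walkB (hi : Int) (L : List (Int × Int)) (st : Int) :
    findHoleLoop hi L st = walkB hi L st := by
  induction L generalizing st with
  | nil => rfl
  | cons seg rest ih =>
    obtain ⟨a, b⟩ := seg
    simp only [findHoleLoop, walkB]
    split_ifs with h1 h2 h3 h4 h5 <;> first | rfl | (apply ih) | omega

-- if every interval starts strictly after pos, the walk returns pos
theorem walkB_of_forall_gt (hi pos : Int) (M : List (Int × Int))
    (h : ∀ s ∈ M, pos < s.1) : walkB hi M pos = some pos := by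
  cases M with
  | nil => rfl
  | cons x r =>
    obtain ⟨a, b⟩ := x
    have := h (a, b) (by simp)
    simp only [walkB]
    rw [if_pos (by omega)]

-- dropping empty segments does not change the walk, on a start-sorted list
theorem walkB_filter (hi : Int) (L : List (Int × Int))
    (hs : L.Pairwise (fun x y => x.1 ≤ y.1)) (pos : Int) :
    walkB hi L pos = walkB hi (L.filter (fun s => s.2 ≥ s.1)) pos := by
  induction L generalizing pos with
  | nil => rfl
  | cons x r ih =>
    obtain ⟨a, b⟩ := x
    rw [List.pairwise_cons] at hs
    by_cases hne : b ≥ a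
    · rw [List.filter_cons_of_pos (by simpa using hne)]
      simp only [walkB]
      split_ifs <;> first | rfl | exact ih hs.2 _
    · rw [List.filter_cons_of_neg (by simpa using hne)]
      simp only [walkB]
      split_ifs with h1 h2 <;> first | omega | skip
      · -- a > pos : every start in filter r is ≥ a > pos
        rw [walkB_of_forall_gt]
        intro s hsmem
        have hmem := List.mem_of_mem_filter hsmem
        have := hs.1 s hmem
        omega
      · exact ih hs.2 _

-- the one-step coalescing identity behind the merge
theorem walkB_coalesce (hi a b c d : Int) (r : List (Int × Int)) (hc : c ≤ b + 1) (pos : Int) :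
    walkB hi ((a, max b d) :: r) pos = walkB hi ((a, b) :: (c, d) :: r) pos := by
  simp only [walkB]
  split_ifs <;> first | rfl | omega | (congr 1; omega)

-- stepping on the same head with equal tails
theorem walkB_cons_congr (hi : Int) (x : Int × Int) (M M' : List (Int × Int))
    (h : ∀ p, walkB hi M p = walkB hi M' p) (pos : Int) :
    walkB hi (x :: M) pos = walkB hi (x :: M') pos := by
  obtain ⟨a, b⟩ := x
  simp only [walkB]
  split_ifs <;> first | rfl | apply h

theorem walkB_mergeFrom (hi : Int) (r : List (Int × Int)) (a b pos : Int) :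
    walkB hi (mergeFrom a b r) pos = walkB hi ((a, b) :: r) pos := by
  induction r generalizing a b pos with
  | nil => rfl
  | cons x r' ih =>
    obtain ⟨c, d⟩ := x
    simp only [mergeFrom]
    split_ifs with hc
    · rw [ih, walkB_coalesce hi a b c d r' hc]
    · exact walkB_cons_congr hi (a, b) _ _ (fun p => ih c d p) pos

-- merging does not change the walk
theorem walkB_mergeB (hi : Int) (M : List (Int × Int)) (pos : Int) :
    walkB hi (mergeB M) pos = walkB hi M pos := by
  cases M with
  | nil => rfl
  | cons x r => obtain ⟨a, b⟩ := x; exact walkB_mergeFrom hi r a b pos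

-- ===== VERDICT (by name: the statement is the Claim_ definition above) =====
theorem findHole_spec : Claim_equal_findHole := by
  intro segs searchSpace _
  unfold Spec_findHole findHole findHole_alt
  rw [findHoleLoop_eq_walkB, walkB_mergeB,
    ← walkB_filter _ _ (PySem.List.sorted_pairwise ..)]
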